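-- pv_equiv track=rewrite | github.com/tugisuwon/hackerrank | woc32/fightTheMonster.py | getMaxMonsters
-- ===== SOURCE A (Python) =====
-- import sys,math
--
-- def getMaxMonsters(n, hit, t, h):
--     # Complete this function
--     h = sorted(h)
--     k = 0
--     ans = 0
--     while t > 0 and k < n:
--         t -= int(math.ceil(h[k] / hit))
--         if t >= 0:
--             ans += 1
--         k += 1
--     return ans
-- ===== SOURCE B (Python) =====
-- def getMaxMonsters(n, hit, t, h):
--     # cumulative table of integer hit costs for the n weakest monsters,
--     # then count how many cumulative costs fit in the time budget
--     prefix = []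
--     total = 0
--     for x in sorted(h)[:n]:
--         total += -(-x // hit)  # exact integer ceil(x / hit)
--         prefix.append(total)
--     return sum(1 for p in prefix if p <= t)
-- ===== Notes on version B (the rewrite author's own statement) =====
-- stated objective: alternative
-- what changed: A's decrement-and-count greedy loop with early stop is replaced by a precomputed cumulative-cost table over the n weakest monsters followed by a count of the cumulative costs within the budget; Pre_ keeps the inputs where A's scan terminates (hit >= 1 with 0 <= n <= len(h), exhausted budget, or budget covered by the total hit cost, plus the trivial n <= -len(h)), excluding hit = 0 (ZeroDivisionError), n > len(h) with budget to spare (IndexError), and negative n or negative hit, malformed parameters on which neither behaviour is specified.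
-- intended difference: On budgets t <= 0 whose n weakest monsters include zero/negative-health ones with total cost still <= t, A returns 0 because its 'while t > 0' guard never starts, although for any t > 0 A itself counts such cost-free monsters as kills; B uniformly counts every monster whose cumulative cost fits the budget, the intended accounting. — e.g. on getMaxMonsters(1, 1, 0, [0]): A returns 0, B returns 1
-- outside the precondition, e.g. on getMaxMonsters(1, 0, -5, [3]): A returns 0, B raises ZeroDivisionError; on getMaxMonsters(2, 1, 100, [3]): A raises IndexError, B returns 1; on getMaxMonsters(2, -2, 2, [-5, 4]): A returns 0, B returns 1
import Mathlib
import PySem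

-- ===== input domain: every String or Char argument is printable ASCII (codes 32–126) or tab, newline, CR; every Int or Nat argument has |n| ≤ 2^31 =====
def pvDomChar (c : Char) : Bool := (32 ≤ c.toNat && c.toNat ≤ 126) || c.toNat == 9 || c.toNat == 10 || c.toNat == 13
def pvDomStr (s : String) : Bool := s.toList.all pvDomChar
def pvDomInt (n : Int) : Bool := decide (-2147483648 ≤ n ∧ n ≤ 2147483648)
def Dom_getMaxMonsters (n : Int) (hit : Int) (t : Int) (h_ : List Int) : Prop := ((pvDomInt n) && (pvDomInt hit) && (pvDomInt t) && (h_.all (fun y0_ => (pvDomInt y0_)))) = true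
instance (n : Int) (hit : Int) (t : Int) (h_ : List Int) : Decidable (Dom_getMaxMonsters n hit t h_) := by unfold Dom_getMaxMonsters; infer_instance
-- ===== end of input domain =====

-- B replaces A's decrement-and-count greedy loop (with its early stop) by a cumulative-cost table
-- over the n weakest monsters followed by a count of the cumulative costs within the budget;
-- same asymptotic cost, different decomposition (objective: alternative).

-- ===== PORT A =====
-- int(math.ceil(a / hit)) : exact for |a|,|hit| ≤ 2^31 since the float quotient cannot cross an
-- integer (gap to an integer ≥ 1/|hit| > relative float error); ported as exact ceiling -((-a)//hit)
def pyCeilDiv (a : Int) (hit : Int) : Int := -(PySem.Int.floordiv (-a) hit)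

-- h = sorted(h)
def sortHealth (h_ : List Int) : List Int := PySem.List.sorted h_ (fun x => x) false

-- A's while loop: fuel = n - k counts the remaining iterations (k < n ↔ fuel > 0);
-- the `none` branch is Python's IndexError h[k], excluded by Pre_
def goA (hs : List Int) (hit : Int) : Int → Int → Nat → Nat → Int
  | _, ans, _, 0 => ans
  | t, ans, k, fuel + 1 =>
    if t > 0 then
      match PySem.List.pyGet? hs (k : Int) with
      | none => ans
      | some x =>
        let t' := t - pyCeilDiv x hit
        goA hs hit t' (if t' ≥ 0 then ans + 1 else ans) (k + 1) fuel
    else ans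

def getMaxMonsters (n : Int) (hit : Int) (t : Int) (h_ : List Int) : Int :=
  goA (sortHealth h_) hit t 0 0 n.toNat

-- ===== PORT B =====
-- Source B's loop: running cumulative sums of the costs, collected into the `prefix` list
def buildP (hit : Int) : Int → List Int → List Int
  | _, [] => []
  | s, x :: xs => (s + pyCeilDiv x hit) :: buildP hit (s + pyCeilDiv x hit) xs

def getMaxMonsters_alt (n : Int) (hit : Int) (t : Int) (h_ : List Int) : Int :=
  let pfx : List Int :=
    buildP hit 0 (PySem.List.slice (sortHealth h_) none (some n))
  ((pfx.countP (fun p => decide (p ≤ t)) : Nat) : Int)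

-- ===== PRECONDITION & SPEC =====
-- Pre_ restricts n and hit to the task's natural domain — hit ≥ 1, 0 ≤ n, and n ≤ len(h) unless
-- A's scan provably ends inside the list (budget already spent, t ≤ 0, or covered by the total
-- hit cost of all monsters) — excluding: hit = 0 (A raises ZeroDivisionError whenever its loop
-- runs), n > len(h) with budget to spare (A raises IndexError when its scan reaches index
-- len(h)), and the malformed negative n (A's loop guard returns 0, B slices from the list's end)
-- and negative hit (a negative hit strength makes "hits needed" negative; neither value is
-- specified there).
-- (the n ≤ -len(h) disjunct: there both programs fight nobody and return 0 whatever hit and t)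
def Pre_getMaxMonsters (n : Int) (hit : Int) (t : Int) (h_ : List Int) : Prop :=
  (1 ≤ hit ∧ 0 ≤ n ∧
    (n ≤ h_.length ∨ t ≤ 0 ∨ t ≤ (h_.map (fun x => pyCeilDiv x hit)).sum)) ∨
  n + h_.length ≤ 0
instance (n : Int) (hit : Int) (t : Int) (h_ : List Int) : Decidable (Pre_getMaxMonsters n hit t h_) := by unfold Pre_getMaxMonsters; infer_instance

def pvWitness_getMaxMonsters : Int × Int × Int × List Int := (2, 3, 5, [4, 7])

-- On budgets t ≤ 0 whose n weakest monsters include zero/negative-health ones with total cost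
-- still ≤ t, A returns 0 (its 'while t > 0' guard never starts) although for any t > 0 A itself
-- counts such cost-free monsters as kills; B uniformly counts every monster whose cumulative
-- cost fits the budget, the intended accounting.
def D_getMaxMonsters (n : Int) (hit : Int) (t : Int) (h_ : List Int) : Prop :=
  t ≤ 0 ∧ 1 ≤ n ∧ (∃ x ∈ h_, x ≤ 0) ∧
    ((sortHealth h_).take n.toNat).foldl (fun s x => s + min (pyCeilDiv x hit) 0) 0 ≤ t
instance (n : Int) (hit : Int) (t : Int) (h_ : List Int) : Decidable (D_getMaxMonsters n hit t h_) := by unfold D_getMaxMonsters; infer_instance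

def Spec_getMaxMonsters (n : Int) (hit : Int) (t : Int) (h_ : List Int) (out : Int) : Prop := ¬ D_getMaxMonsters n hit t h_ → out = getMaxMonsters_alt n hit t h_
instance (n : Int) (hit : Int) (t : Int) (h_ : List Int) (out : Int) : Decidable (Spec_getMaxMonsters n hit t h_ out) := by unfold Spec_getMaxMonsters; infer_instance

def pvDiffWitness_getMaxMonsters : Int × Int × Int × List Int := (1, 1, 0, [0])
def pvDiffWitnessOut_getMaxMonsters : Int × Int := (0, 1)

-- ===== CLAIM (what is proved, stated in full; the proofs are below) =====
def Claim_unchanged_getMaxMonsters : Prop := ∀ (n : Int) (hit : Int) (t : Int) (h_ : List Int), Dom_getMaxMonsters n hit t h_ → Pre_getMaxMonsters n hit t h_ → Spec_getMaxMonsters n hit t h_ (getMaxMonsters n hit t h_)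
def Claim_changed_getMaxMonsters : Prop := Dom_getMaxMonsters (pvDiffWitness_getMaxMonsters.1) (pvDiffWitness_getMaxMonsters.2.1) (pvDiffWitness_getMaxMonsters.2.2.1) (pvDiffWitness_getMaxMonsters.2.2.2) ∧ Pre_getMaxMonsters (pvDiffWitness_getMaxMonsters.1) (pvDiffWitness_getMaxMonsters.2.1) (pvDiffWitness_getMaxMonsters.2.2.1) (pvDiffWitness_getMaxMonsters.2.2.2) ∧ D_getMaxMonsters (pvDiffWitness_getMaxMonsters.1) (pvDiffWitness_getMaxMonsters.2.1) (pvDiffWitness_getMaxMonsters.2.2.1) (pvDiffWitness_getMaxMonsters.2.2.2) ∧ getMaxMonsters (pvDiffWitness_getMaxMonsters.1) (pvDiffWitness_getMaxMonsters.2.1) (pvDiffWitness_getMaxMonsters.2.2.1) (pvDiffWitness_getMaxMonsters.2.2.2) = pvDiffWitnessOut_getMaxMonsters.1 ∧ getMaxMonsters_alt (pvDiffWitness_getMaxMonsters.1) (pvDiffWitness_getMaxMonsters.2.1) (pvDiffWitness_getMaxMonsters.2.2.1) (pvDiffWitness_getMaxMonsters.2.2.2) = pvDiffWitnessOut_getMaxMonsters.2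 ∧ pvDiffWitnessOut_getMaxMonsters.1 ≠ pvDiffWitnessOut_getMaxMonsters.2
def Claim_exact_getMaxMonsters : Prop := ∀ (n : Int) (hit : Int) (t : Int) (h_ : List Int), Dom_getMaxMonsters n hit t h_ → Pre_getMaxMonsters n hit t h_ → D_getMaxMonsters n hit t h_ → getMaxMonsters n hit t h_ ≠ getMaxMonsters_alt n hit t h_

-- ===== LEMMAS AND PROOFS =====

-- the mathematical meaning of A's loop: fold of its body over the (sorted, truncated) health list
def specA (hit : Int) : Int → List Int → Int
  | _, [] => 0
  | t, x :: xs =>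
    if t > 0 then
      (if t - pyCeilDiv x hit ≥ 0 then 1 else 0) + specA hit (t - pyCeilDiv x hit) xs
    else 0

theorem specA_nonpos (hit t : Int) (l : List Int) (ht : ¬ t > 0) : specA hit t l = 0 := by
  cases l <;> simp [specA, ht]

theorem goA_eq (hs : List Int) (hit : Int) :
    ∀ (fuel : Nat) (k : Nat) (t ans : Int), k + fuel ≤ hs.length →
      goA hs hit t ans k fuel = ans + specA hit t ((hs.drop k).take fuel) := by
  intro fuel
  induction fuel with
  | zero => intro k t ans _; simp [goA, specA]
  | succ m ih =>
    intro k t ans hk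
    have hklt : k < hs.length := by omega
    by_cases ht : t > 0
    · have hget : PySem.List.pyGet? hs (k : Int) = some hs[k] := by
        simp [PySem.List.pyGet?_natCast, List.getElem?_eq_getElem hklt]
      have hdrop : hs.drop k = hs[k] :: hs.drop (k + 1) := List.drop_eq_getElem_cons hklt
      rw [show goA hs hit t ans k (m + 1) =
            (if t > 0 then
              match PySem.List.pyGet? hs (k : Int) with
              | none => ans
              | some x =>
                let t' := t - pyCeilDiv x hit
                goA hs hit t' (if t' ≥ 0 then ans + 1 else ans) (k + 1) m
            else ans) from rfl]
      rw [if_pos ht, hget]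
      simp only []
      rw [ih (k + 1) _ _ (by omega), hdrop]
      simp only [List.take_succ_cons, specA, if_pos ht]
      split_ifs <;> omega
    · rw [show goA hs hit t ans k (m + 1) =
            (if t > 0 then
              match PySem.List.pyGet? hs (k : Int) with
              | none => ans
              | some x =>
                let t' := t - pyCeilDiv x hit
                goA hs hit t' (if t' ≥ 0 then ans + 1 else ans) (k + 1) m
            else ans) from rfl]
      rw [if_neg ht, specA_nonpos hit t _ ht]
      omega

-- past the list's end the remaining costs are gone: if the budget is covered by the suffix's
-- total cost, A's loop ends inside the list and computes specA of the whole suffix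
theorem goA_eq_big (hs : List Int) (hit : Int) :
    ∀ (fuel k : Nat) (t ans : Int), hs.length ≤ k + fuel →
      t ≤ ((hs.drop k).map (fun x => pyCeilDiv x hit)).sum →
      goA hs hit t ans k fuel = ans + specA hit t (hs.drop k) := by
  intro fuel
  induction fuel with
  | zero =>
    intro k t ans hk hts
    have hdrop : hs.drop k = [] := List.drop_eq_nil_of_le (by omega)
    rw [hdrop] at hts ⊢
    simp only [List.map_nil, List.sum_nil] at hts
    simp [goA, specA]
  | succ m ih =>
    intro k t ans hk hts
    by_cases hklt : k < hs.length
    · by_cases ht : t > 0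
      · have hget : PySem.List.pyGet? hs (k : Int) = some hs[k] := by
          simp [PySem.List.pyGet?_natCast, List.getElem?_eq_getElem hklt]
        have hdrop : hs.drop k = hs[k] :: hs.drop (k + 1) := List.drop_eq_getElem_cons hklt
        rw [show goA hs hit t ans k (m + 1) =
              (if t > 0 then
                match PySem.List.pyGet? hs (k : Int) with
                | none => ans
                | some x =>
                  let t' := t - pyCeilDiv x hit
                  goA hs hit t' (if t' ≥ 0 then ans + 1 else ans) (k + 1) m
              else ans) from rfl]
        rw [if_pos ht, hget]
        simp only []
        rw [hdrop] at hts
        simp only [List.map_cons, List.sum_cons] at hts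
        rw [ih (k + 1) _ _ (by omega) (by omega), hdrop]
        simp only [specA, if_pos ht]
        split_ifs <;> omega
      · rw [show goA hs hit t ans k (m + 1) =
              (if t > 0 then
                match PySem.List.pyGet? hs (k : Int) with
                | none => ans
                | some x =>
                  let t' := t - pyCeilDiv x hit
                  goA hs hit t' (if t' ≥ 0 then ans + 1 else ans) (k + 1) m
              else ans) from rfl]
        rw [if_neg ht, specA_nonpos hit t _ ht]
        omega
    · have hdrop : hs.drop k = [] := List.drop_eq_nil_of_le (by omega)
      rw [hdrop] at hts ⊢
      simp only [List.map_nil, List.sum_nil] at hts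
      rw [show goA hs hit t ans k (m + 1) =
            (if t > 0 then
              match PySem.List.pyGet? hs (k : Int) with
              | none => ans
              | some x =>
                let t' := t - pyCeilDiv x hit
                goA hs hit t' (if t' ≥ 0 then ans + 1 else ans) (k + 1) m
            else ans) from rfl]
      rw [if_neg (by omega), specA_nonpos hit t _ (by omega)]
      omega

theorem goA_zero (hs : List Int) (hit t : Int) (fuel : Nat) (ht : ¬ t > 0) :
    goA hs hit t 0 0 fuel = 0 := by
  cases fuel with
  | zero => rfl
  | succ m =>
    rw [show goA hs hit t 0 0 (m + 1) =
          (if t > 0 then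
            match PySem.List.pyGet? hs (0 : Int) with
            | none => (0 : Int)
            | some x =>
              let t' := t - pyCeilDiv x hit
              goA hs hit t' (if t' ≥ 0 then 0 + 1 else 0) (0 + 1) m
          else 0) from rfl]
    rw [if_neg ht]

theorem buildP_shift (hit : Int) (xs : List Int) :
    ∀ s : Int, buildP hit s xs = (buildP hit 0 xs).map (s + ·) := by
  induction xs with
  | nil => intro s; simp [buildP]
  | cons x xs ih =>
    intro s
    simp only [buildP, zero_add, List.map_cons]
    congr 1
    rw [ih (s + pyCeilDiv x hit), ih (pyCeilDiv x hit), List.map_map]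
    exact List.map_congr_left (fun a _ => by simp [add_assoc])

theorem pyCeilDiv_pos (x hit : Int) (hhit : 1 ≤ hit) (hx : 1 ≤ x) : 1 ≤ pyCeilDiv x hit := by
  have h : PySem.Int.floordiv (-x) hit < 0 := by
    rw [PySem.Int.floordiv_lt_iff_lt_mul (by omega : (0:Int) < hit)]
    omega
  unfold pyCeilDiv
  omega

theorem pyCeilDiv_nonpos (x hit : Int) (hhit : 1 ≤ hit) (hx : x ≤ 0) : pyCeilDiv x hit ≤ 0 := by
  have h : 0 ≤ PySem.Int.floordiv (-x) hit := by
    rw [PySem.Int.le_floordiv_iff_mul_le (by omega : (0:Int) < hit)]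
    omega
  unfold pyCeilDiv
  omega

theorem pyCeilDiv_mono (a b hit : Int) (hhit : 1 ≤ hit) (hab : a ≤ b) :
    pyCeilDiv a hit ≤ pyCeilDiv b hit := by
  have h1 : PySem.Int.floordiv (-b) hit * hit ≤ -b :=
    (PySem.Int.le_floordiv_iff_mul_le (by omega : (0:Int) < hit)).mp le_rfl
  have h2 : PySem.Int.floordiv (-b) hit ≤ PySem.Int.floordiv (-a) hit := by
    rw [PySem.Int.le_floordiv_iff_mul_le (by omega : (0:Int) < hit)]
    omega
  unfold pyCeilDiv
  omega

-- D_'s folded sum of clamped costs is the total cost of the non-positive-health entries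
theorem foldl_cost (hit : Int) (hhit : 1 ≤ hit) :
    ∀ (l : List Int) (s : Int),
      l.foldl (fun s x => s + min (pyCeilDiv x hit) 0) s =
        s + ((l.filter (fun x => decide (x ≤ 0))).map (fun x => pyCeilDiv x hit)).sum := by
  intro l
  induction l with
  | nil => intro s; simp
  | cons x xs ih =>
    intro s
    simp only [List.foldl_cons]
    by_cases hx : x ≤ 0
    · rw [List.filter_cons_of_pos (by simpa using hx)]
      simp only [List.map_cons, List.sum_cons]
      rw [ih, min_eq_left (pyCeilDiv_nonpos x hit hhit hx)]
      ring
    · rw [List.filter_cons_of_neg (by simpa using hx)]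
      have h1 : 1 ≤ pyCeilDiv x hit := pyCeilDiv_pos x hit hhit (by omega)
      rw [ih, min_eq_right (by omega)]
      ring

-- every cumulative sum is ≥ s + c₀ when every cost is ≥ c₀ ≥ 0
theorem mem_buildP_ge (hit c₀ : Int) (hc₀ : 0 ≤ c₀) :
    ∀ (xs : List Int) (s : Int), (∀ x ∈ xs, c₀ ≤ pyCeilDiv x hit) →
      ∀ p ∈ buildP hit s xs, s + c₀ ≤ p := by
  intro xs
  induction xs with
  | nil => intro s _ p hp; simp [buildP] at hp
  | cons x xs ih =>
    intro s hall p hp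
    simp only [buildP, List.mem_cons] at hp
    have hc : c₀ ≤ pyCeilDiv x hit := hall x (by simp)
    rcases hp with rfl | hp
    · omega
    · have := ih (s + pyCeilDiv x hit) (fun y hy => hall y (by simp [hy])) p hp
      omega

theorem list_sum_nonpos : ∀ (l : List Int), (∀ x ∈ l, x ≤ 0) → l.sum ≤ 0 := by
  intro l
  induction l with
  | nil => intro _; simp
  | cons x xs ih =>
    intro h
    have h1 := h x (by simp)
    have h2 := ih (fun y hy => h y (by simp [hy]))
    simp only [List.sum_cons]
    omega

-- every cumulative sum is ≥ s + (total cost of the non-positive-health entries)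
theorem mem_buildP_ge_sumneg (hit : Int) (hhit : 1 ≤ hit) :
    ∀ (xs : List Int) (s : Int), ∀ p ∈ buildP hit s xs,
      s + ((xs.filter (fun x => decide (x ≤ 0))).map (fun x => pyCeilDiv x hit)).sum ≤ p := by
  intro xs
  induction xs with
  | nil => intro s p hp; simp [buildP] at hp
  | cons x xs ih =>
    intro s p hp
    simp only [buildP, List.mem_cons] at hp
    have hsum_nonpos : ((xs.filter (fun x => decide (x ≤ 0))).map (fun x => pyCeilDiv x hit)).sum ≤ 0 := by
      apply list_sum_nonpos
      intro y hy
      simp only [List.mem_map, List.mem_filter, decide_eq_true_eq] at hy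
      obtain ⟨z, ⟨_, hz⟩, rfl⟩ := hy
      exact pyCeilDiv_nonpos z hit hhit hz
    by_cases hx : x ≤ 0
    · rw [List.filter_cons_of_pos (by simpa using hx)]
      simp only [List.map_cons, List.sum_cons]
      rcases hp with rfl | hp
      · omega
      · have := ih (s + pyCeilDiv x hit) p hp
        omega
    · have hcx : 1 ≤ pyCeilDiv x hit := pyCeilDiv_pos x hit hhit (by omega)
      rw [List.filter_cons_of_neg (by simpa using hx)]
      rcases hp with rfl | hp
      · omega
      · have := ih (s + pyCeilDiv x hit) p hp
        omega

-- with a positive budget, B's count of in-budget cumulative costs equals A's greedy count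
-- (the costs of a sorted health list are nondecreasing, so A's early stop loses nothing)
theorem count_eq_specA_pos (hit : Int) (hhit : 1 ≤ hit) :
    ∀ (xs : List Int), xs.Pairwise (fun a b => pyCeilDiv a hit ≤ pyCeilDiv b hit) →
      ∀ t : Int, 0 < t →
      ((buildP hit 0 xs).countP (fun p => decide (p ≤ t)) : Int) = specA hit t xs := by
  intro xs
  induction xs with
  | nil => intro _ t _; simp [buildP, specA]
  | cons x xs ih =>
    intro hpw t ht
    obtain ⟨hhead, htail⟩ := List.pairwise_cons.mp hpw
    set c := pyCeilDiv x hit with hcdef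
    have hbuild : buildP hit 0 (x :: xs) = c :: (buildP hit 0 xs).map (c + ·) := by
      simp only [buildP, zero_add]
      rw [buildP_shift]
    have hmapcount : (((buildP hit 0 xs).map (c + ·)).countP (fun p => decide (p ≤ t))) =
        (buildP hit 0 xs).countP (fun p => decide (p ≤ t - c)) := by
      rw [List.countP_map]
      exact List.countP_congr (fun p _ => by
        simp only [Function.comp_apply, decide_eq_true_eq]
        omega)
    rw [specA, if_pos (by omega : t > 0), hbuild, List.countP_cons, hmapcount]
    by_cases htc : 0 < t - c
    · rw [← ih htail (t - c) htc]
      have h1 : decide (c ≤ t) = true := by simp; omega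
      have h2 : t - c ≥ 0 := by omega
      simp [h1, if_pos h2]
      omega
    · -- the budget dies at this cost: c ≥ t > 0, all later costs ≥ c, so no later sum fits
      have hc_pos : t ≤ c := by omega
      have hz : (buildP hit 0 xs).countP (fun p => decide (p ≤ t - c)) = 0 := by
        rw [List.countP_eq_zero]
        intro p hp
        have := mem_buildP_ge hit c (by omega) xs 0 hhead p hp
        simp only [decide_eq_true_eq]
        omega
      rw [hz, specA_nonpos hit (t - c) xs (by omega)]
      by_cases hct : c ≤ t
      · have h1 : decide (c ≤ t) = true := by simp [hct]
        have h2 : t - c ≥ 0 := by omega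
        simp [h1]
        rw [← hcdef]
        exact hct
      · have h1 : decide (c ≤ t) = false := by simp; omega
        have h2 : ¬ t - c ≥ 0 := by omega
        simp [h1]
        rw [← hcdef]
        exact not_le.mp hct

-- in a sorted list with a non-positive entry, the total cost of the non-positive entries is
-- itself one of the cumulative sums
theorem mem_buildP_sumneg (hit : Int) :
    ∀ (xs : List Int), xs.Pairwise (fun a b => a ≤ b) →
      xs.filter (fun x => decide (x ≤ 0)) ≠ [] → ∀ s : Int,
      s + ((xs.filter (fun x => decide (x ≤ 0))).map (fun x => pyCeilDiv x hit)).sum ∈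
        buildP hit s xs := by
  intro xs
  induction xs with
  | nil => intro _ hne; simp at hne
  | cons x xs ih =>
    intro hpw hne s
    obtain ⟨hhead, htail⟩ := List.pairwise_cons.mp hpw
    by_cases hx : x ≤ 0
    · rw [List.filter_cons_of_pos (by simpa using hx)]
      simp only [List.map_cons, List.sum_cons]
      by_cases hne2 : xs.filter (fun x => decide (x ≤ 0)) = []
      · simp only [buildP, hne2, List.map_nil, List.sum_nil, List.mem_cons]
        left
        omega
      · have hmem := ih htail hne2 (s + pyCeilDiv x hit)
        simp only [buildP, List.mem_cons]
        right
        have harr : s + (pyCeilDiv x hit +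
            ((xs.filter (fun x => decide (x ≤ 0))).map (fun x => pyCeilDiv x hit)).sum) =
            (s + pyCeilDiv x hit) +
            ((xs.filter (fun x => decide (x ≤ 0))).map (fun x => pyCeilDiv x hit)).sum := by ring
        rw [harr]
        exact hmem
    · exfalso
      apply hne
      rw [List.filter_cons_of_neg (by simpa using hx)]
      rw [List.filter_eq_nil_iff]
      intro a ha
      have := hhead a ha
      simp only [decide_eq_true_eq]
      omega

-- ===== VERDICT (by name: the statement is the Claim_ definition above) =====
theorem getMaxMonsters_spec : Claim_unchanged_getMaxMonsters := by
  intro n hit t h_ _ hpre hnd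
  rcases hpre with ⟨hhit, hn0, hor⟩ | hnn
  case inr =>
    -- n ≤ -len(h): A's loop never runs and B's slice is empty; both count 0
    unfold getMaxMonsters getMaxMonsters_alt
    have hlen2 : (sortHealth h_).length = h_.length := PySem.List.length_sorted ..
    have hA : n.toNat = 0 := by omega
    have hB : PySem.List.slice (sortHealth h_) none (some n) = [] := by
      by_cases h0 : n = 0
      · have hl0 : h_.length = 0 := by omega
        rw [h0, PySem.List.slice_to _ (by omega)]
        simp
      · have hkpos : 0 < (-n).toNat := by omega
        have hn' : n = -((((-n).toNat : Nat)) : Int) := by omega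
        rw [hn', PySem.List.slice_to_neg_natCast _ _ hkpos]
        have hz : (sortHealth h_).length - (-n).toNat = 0 := by omega
        rw [hz]
        simp
    rw [hA, hB]
    simp [goA, buildP]
  unfold getMaxMonsters getMaxMonsters_alt
  set hs := sortHealth h_ with hhs
  have hsort : hs = PySem.List.sorted h_ (fun x => x) false := hhs.trans rfl
  have hlen : hs.length = h_.length := by
    rw [hsort]; exact PySem.List.length_sorted ..
  have hslice : PySem.List.slice hs none (some n) = hs.take n.toNat :=
    PySem.List.slice_to hs hn0
  set xs := hs.take n.toNat with hxs
  have hpw : xs.Pairwise (fun a b => a ≤ b) := by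
    rw [hxs, hsort]
    exact (PySem.List.sorted_pairwise h_ (fun x => x)).sublist (List.take_sublist _ _)
  rw [hslice]
  simp only []
  by_cases ht : 0 < t
  · by_cases hnl : n ≤ (h_.length : Int)
    · rw [goA_eq hs hit n.toNat 0 t 0 (by omega), List.drop_zero]
      simp only [zero_add, ← hxs]
      rw [← count_eq_specA_pos hit hhit xs (hpw.imp (fun hab => pyCeilDiv_mono _ _ hit hhit hab)) t ht]
    · -- n exceeds the list but the total cost covers the budget: both sides scan the whole list
      have hts : t ≤ (h_.map (fun x => pyCeilDiv x hit)).sum := by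
        rcases hor with h | h | h
        · omega
        · omega
        · exact h
      have hxs_full : xs = hs := by
        rw [hxs]
        exact List.take_of_length_le (by omega)
      have hsum_eq : (hs.map (fun x => pyCeilDiv x hit)).sum =
          (h_.map (fun x => pyCeilDiv x hit)).sum := by
        have hperm : hs.Perm h_ := by
          rw [hsort]
          exact PySem.List.sorted_perm ..
        exact (hperm.map _).sum_eq
      rw [hxs_full, goA_eq_big hs hit n.toNat 0 t 0 (by omega)
            (by rw [List.drop_zero, hsum_eq]; exact hts), List.drop_zero]
      simp only [zero_add]
      have hpws : hs.Pairwise (fun a b => a ≤ b) := by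
        rw [hsort]
        exact PySem.List.sorted_pairwise h_ (fun x => x)
      rw [← count_eq_specA_pos hit hhit hs (hpws.imp (fun hab => pyCeilDiv_mono _ _ hit hhit hab)) t ht]
  · -- t ≤ 0: A returns 0 at once; outside D_ no cumulative cost fits a non-positive budget either
    rw [goA_zero hs hit t n.toNat (by omega)]
    unfold D_getMaxMonsters at hnd
    rw [← hhs, ← hxs, foldl_cost hit hhit _ 0] at hnd
    push_neg at hnd
    have hz : (buildP hit 0 xs).countP (fun p => decide (p ≤ t)) = 0 := by
      rw [List.countP_eq_zero]
      intro p hp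
      simp only [decide_eq_true_eq]
      by_cases hS : xs.filter (fun x => decide (x ≤ 0)) = []
      · have hall : ∀ x ∈ xs, 1 ≤ pyCeilDiv x hit := by
          intro x hx
          have hx1 : ¬ (x ≤ 0) := by
            have := List.filter_eq_nil_iff.mp hS x hx
            simpa using this
          exact pyCeilDiv_pos x hit hhit (by omega)
        have := mem_buildP_ge hit 1 (by omega) xs 0 hall p hp
        omega
      · obtain ⟨x0, hx0S⟩ := List.exists_mem_of_ne_nil _ hS
        have hx0xs : x0 ∈ xs := (List.mem_filter.mp hx0S).1
        have hx0le : x0 ≤ 0 := by simpa using (List.mem_filter.mp hx0S).2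
        have hx0h : x0 ∈ h_ := by
          have hx0hs : x0 ∈ hs := List.mem_of_mem_take hx0xs
          rw [hsort] at hx0hs
          exact (PySem.List.mem_sorted ..).mp hx0hs
        have hn1 : 1 ≤ n := by
          by_contra hcon
          have hz0 : n.toNat = 0 := by omega
          rw [hxs, hz0, List.take_zero] at hx0xs
          simp at hx0xs
        have hsum := hnd (by omega) hn1 ⟨x0, hx0h, hx0le⟩
        have := mem_buildP_ge_sumneg hit hhit xs 0 p hp
        omega
    rw [hz]
    rfl

theorem getMaxMonsters_changed : Claim_changed_getMaxMonsters := by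
  unfold Claim_changed_getMaxMonsters
  decide

theorem getMaxMonsters_tight : Claim_exact_getMaxMonsters := by
  intro n hit t h_ _ hpre hd
  rcases hpre with ⟨hhit, hn0, -⟩ | hnn
  case inr =>
    -- impossible: D_ needs a monster (n ≥ 1 and a non-empty list)
    exfalso
    unfold D_getMaxMonsters at hd
    obtain ⟨-, hn1, ⟨x0, hx0h, -⟩, -⟩ := hd
    have := List.length_pos_of_mem hx0h
    omega
  unfold getMaxMonsters getMaxMonsters_alt
  set hs := sortHealth h_ with hhs
  have hsort : hs = PySem.List.sorted h_ (fun x => x) false := hhs.trans rfl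
  have hslice : PySem.List.slice hs none (some n) = hs.take n.toNat :=
    PySem.List.slice_to hs hn0
  set xs := hs.take n.toNat with hxs
  unfold D_getMaxMonsters at hd
  rw [← hhs, ← hxs, foldl_cost hit hhit _ 0] at hd
  obtain ⟨ht, hn1, ⟨x0, hx0h, hx0le⟩, hsum⟩ := hd
  have hx0hs : x0 ∈ hs := by
    rw [hsort]
    exact (PySem.List.mem_sorted ..).mpr hx0h
  have hne : xs.filter (fun x => decide (x ≤ 0)) ≠ [] := by
    cases hhead : hs with
    | nil =>
      rw [hhead] at hx0hs
      simp at hx0hs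
    | cons m tl =>
      have hm : m ≤ x0 := by
        have := PySem.List.key_head_sorted_le _ _ (hsort.symm.trans hhead) x0 hx0h
        simpa using this
      have hnt : n.toNat = (n - 1).toNat + 1 := by omega
      rw [hxs, hhead, hnt, List.take_succ_cons,
        List.filter_cons_of_pos (by simp; omega)]
      simp
  have hpw : xs.Pairwise (fun a b => a ≤ b) := by
    rw [hxs, hsort]
    exact (PySem.List.sorted_pairwise h_ (fun x => x)).sublist (List.take_sublist _ _)
  have hmem := mem_buildP_sumneg hit xs hpw hne 0
  rw [zero_add] at hmem
  rw [goA_zero hs hit t n.toNat (by omega), hslice]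
  simp only [← hxs]
  have hpos : 0 < (buildP hit 0 xs).countP (fun p => decide (p ≤ t)) := by
    rw [List.countP_pos_iff]
    exact ⟨_, hmem, by simp only [decide_eq_true_eq]; omega⟩
  intro hcontra
  omega
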